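-- pv_equiv track=rewrite | github.com/marcuspeh/leetcode-solutions | 1630-arithmetic-subarrays/1630-arithmetic-subarrays.py | checkAP
-- ===== SOURCE A (Python) =====
-- def checkAP(nums, left, right):
--     numbers = set(nums[left: right + 1])
--     smallest = min(numbers)
--     largest = max(numbers)
--
--     difference = largest - smallest
--
--     if difference % (right - left):
--         return False
--
--     difference //= (right - left)
--
--     prev = smallest
--
--     while prev < largest:
--         if (prev + difference) not in numbers:
--             return False
--
--         prev += difference
--
--     return True
-- ===== SOURCE B (Python) =====
-- def checkAP(nums, left, right):
--     values = sorted(set(nums[left:right + 1]))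
--     step, rem = divmod(values[-1] - values[0], right - left)
--     if rem:
--         return False
--     if step == 0:
--         return len(values) == 1
--     return values == list(range(values[0], values[-1] + 1, step))
-- ===== Notes on version B (the rewrite author's own statement) =====
-- stated objective: alternative
-- what changed: Replaces A's membership-stepping while-loop over a set (probe min+k*step for each k) by sorting the distinct values once and comparing them structurally against list(range(lo, hi+1, step)).
import Mathlib
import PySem

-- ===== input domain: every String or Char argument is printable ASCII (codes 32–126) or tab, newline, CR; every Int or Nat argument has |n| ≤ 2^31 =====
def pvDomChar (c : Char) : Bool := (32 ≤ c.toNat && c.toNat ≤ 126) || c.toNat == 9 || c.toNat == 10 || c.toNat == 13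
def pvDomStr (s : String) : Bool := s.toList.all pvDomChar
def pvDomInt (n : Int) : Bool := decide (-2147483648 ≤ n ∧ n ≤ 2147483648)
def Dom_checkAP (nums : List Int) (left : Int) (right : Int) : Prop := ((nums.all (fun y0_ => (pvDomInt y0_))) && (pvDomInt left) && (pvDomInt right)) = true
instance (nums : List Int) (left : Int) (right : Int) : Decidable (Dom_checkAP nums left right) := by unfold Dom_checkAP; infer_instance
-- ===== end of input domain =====

-- B replaces A's membership-stepping while-loop by one structural comparison of the
-- sorted distinct values against range(lo, hi+1, step) (alternative; not claimed faster).

-- ===== PORT A =====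
-- the 'while prev < largest' loop; fuel bounds the iteration count (each Python
-- iteration either returns or advances prev; on Pre_ the fuel (largest-smallest)+1
-- is never exhausted, since whenever the loop body repeats, difference ≥ 1 there)
def pyLoopA (numbers : PySem.Set Int) (difference largest : Int) : Nat → Int → Bool
  | 0, _ => false
  | fuel + 1, prev =>
    if prev < largest then
      if !(PySem.Set.contains numbers (prev + difference)) then false
      else pyLoopA numbers difference largest fuel (prev + difference)
    else true

def checkAP (nums : List Int) (left : Int) (right : Int) : Bool :=
  let numbers : PySem.Set Int := PySem.Set.ofList (PySem.List.slice nums (some left) (some (right + 1)))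
  match PySem.List.min? numbers (fun x => x), PySem.List.max? numbers (fun x => x) with
  | some smallest, some largest =>
    let difference := largest - smallest
    if PySem.Int.mod difference (right - left) ≠ 0 then false
    else
      let difference := PySem.Int.floordiv difference (right - left)
      pyLoopA numbers difference largest ((largest - smallest).toNat + 1) smallest
  | _, _ => false  -- min() of an empty set: ValueError, excluded by Pre_

-- ===== PORT B =====
def checkAP_alt (nums : List Int) (left : Int) (right : Int) : Bool :=
  let values := PySem.List.sorted (PySem.Set.ofList (PySem.List.slice nums (some left) (some (right + 1)))) (fun x => x) false
  match PySem.List.pyGet? values (-1) with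
  | none => false    -- values[-1] of an empty list: IndexError, excluded by Pre_
  | some hi =>
    match PySem.List.pyGet? values 0 with
    | none => false
    | some lo =>
      match PySem.Int.divmod? (hi - lo) (right - left) with
      | some (step, rem) =>
        if rem ≠ 0 then false
        else if step = 0 then decide (values.length = 1)
        else decide (values = PySem.List.pyRange lo (hi + 1) step)
      | none => false  -- divmod by zero: ZeroDivisionError, excluded by Pre_

-- ===== PRECONDITION & SPEC =====
-- Pre_ excludes exactly the inputs where A (and B alike) raises: an empty slice
-- nums[left:right+1] (ValueError in A / IndexError in B) and left == right
-- (ZeroDivisionError in both).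
def Pre_checkAP (nums : List Int) (left : Int) (right : Int) : Prop :=
  left ≠ right ∧
    PySem.List.clampIdx nums.length left < PySem.List.clampIdx nums.length (right + 1)
instance (nums : List Int) (left : Int) (right : Int) : Decidable (Pre_checkAP nums left right) := by unfold Pre_checkAP; infer_instance

def pvWitness_checkAP : List Int × Int × Int := ([1, 3, 5], 0, 2)

def Spec_checkAP (nums : List Int) (left : Int) (right : Int) (out : Bool) : Prop := out = checkAP_alt nums left right
instance (nums : List Int) (left : Int) (right : Int) (out : Bool) : Decidable (Spec_checkAP nums left right out) := by unfold Spec_checkAP; infer_instance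

-- ===== CLAIM (what is proved, stated in full; the proofs are below) =====
def Claim_equal_checkAP : Prop := ∀ (nums : List Int) (left : Int) (right : Int), Dom_checkAP nums left right → Pre_checkAP nums left right → Spec_checkAP nums left right (checkAP nums left right)

-- ===== LEMMAS AND PROOFS =====

-- the arithmetic progression a, a+d, …, a+(n-1)d
def apList (a d : Int) : Nat → List Int
  | 0 => []
  | n + 1 => a :: apList (a + d) d n

theorem length_apList (a d : Int) (n : Nat) : (apList a d n).length = n := by
  induction n generalizing a with
  | zero => rfl
  | succ n ih => simp [apList, ih]

theorem mem_apList (a d x : Int) (n : Nat) :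
    x ∈ apList a d n ↔ ∃ j : Nat, j < n ∧ x = a + j * d := by
  induction n generalizing a with
  | zero => simp [apList]
  | succ n ih =>
    simp only [apList, List.mem_cons, ih]
    constructor
    · rintro (rfl | ⟨j, hj, rfl⟩)
      · exact ⟨0, by omega, by ring⟩
      · exact ⟨j + 1, by omega, by push_cast; ring⟩
    · rintro ⟨j, hj, rfl⟩
      match j with
      | 0 => left; simp
      | j + 1 => right; exact ⟨j, by omega, by push_cast; ring⟩

theorem pairwise_apList (a d : Int) (hd : 0 < d) (n : Nat) :
    (apList a d n).Pairwise (· < ·) := by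
  induction n generalizing a with
  | zero => simp [apList]
  | succ n ih =>
    simp only [apList, List.pairwise_cons]
    refine ⟨fun x hx => ?_, ih (a + d)⟩
    obtain ⟨j, _, rfl⟩ := (mem_apList (a + d) d x n).1 hx
    nlinarith [Int.mul_nonneg (Int.natCast_nonneg j) hd.le]

theorem apList_eq_map (a d : Int) (n : Nat) :
    apList a d n = (List.range n).map (fun k : Nat => a + d * (k : Int)) := by
  induction n generalizing a with
  | zero => rfl
  | succ n ih =>
    rw [List.range_succ_eq_map, apList]
    simp only [List.map_cons, List.map_map]
    refine List.cons_eq_cons.2 ⟨by simp, ?_⟩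
    rw [ih (a + d)]
    apply List.map_congr_left
    intro k _
    simp only [Function.comp_apply]
    push_cast
    ring

theorem pyLoopA_true_iff (t : PySem.Set Int) (d bb : Int) (hd : 0 < d)
    (fuel : Nat) (prev : Int) (hle : prev ≤ bb) (hdvd : d ∣ bb - prev)
    (hfuel : bb - prev < (fuel : Int)) :
    pyLoopA t d bb fuel prev = true ↔
      ∀ j : Nat, 1 ≤ j → prev + j * d ≤ bb → (prev + j * d) ∈ t := by
  induction fuel generalizing prev with
  | zero =>
    exfalso
    simp only [Nat.cast_zero] at hfuel
    omega
  | succ fuel ih =>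
    rw [pyLoopA]
    by_cases hp : prev < bb
    · have hstep : prev + d ≤ bb := by
        obtain ⟨k, hk⟩ := hdvd
        have hk1 : 1 ≤ k := by nlinarith
        nlinarith
      rw [if_pos hp]
      by_cases hmem : (prev + d) ∈ t
      · rw [(PySem.Set.contains_iff t (prev + d)).2 hmem]
        simp only [Bool.not_true, Bool.false_eq_true, if_false]
        rw [ih (prev + d) hstep
          (by obtain ⟨k, hk⟩ := hdvd; exact ⟨k - 1, by rw [mul_sub, ← hk]; ring⟩) (by omega)]
        constructor
        · intro h j hj hjb
          match j with
          | 1 => simpa using hmem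
          | j + 2 =>
            have heq : prev + ((j + 2 : Nat) : Int) * d = prev + d + ((j + 1 : Nat) : Int) * d := by
              push_cast; ring
            rw [heq]
            exact h (j + 1) (by omega) (by rw [← heq]; exact hjb)
        · intro h j hj hjb
          rw [show prev + d + (j : Int) * d = prev + ((j + 1 : Nat) : Int) * d by push_cast; ring]
          exact h (j + 1) (by omega) (by push_cast at hjb ⊢; linarith)
      · have : PySem.Set.contains t (prev + d) = false := by
          rw [← Bool.not_eq_true, PySem.Set.contains_iff]; exact hmem
        rw [this]
        simp only [Bool.not_false, if_true]
        constructor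
        · intro h; exact absurd h (by simp)
        · intro h
          exact absurd (by simpa using h 1 le_rfl (by simpa using hstep)) hmem
    · rw [if_neg hp]
      have hpb : prev = bb := le_antisymm hle (by omega)
      subst hpb
      constructor
      · intro _ j hj hjb
        exfalso
        nlinarith [Int.natCast_pos.2 hj]
      · intro _; rfl

theorem checkAP_core_eq (nums : List Int) (left right : Int)
    (hm : left ≠ right)
    (hcl : PySem.List.clampIdx nums.length left < PySem.List.clampIdx nums.length (right + 1)) :
    checkAP nums left right = checkAP_alt nums left right := by
  have hls := PySem.List.length_slice (xs := nums) (a := left) (b := right + 1)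
  have hslen : 0 < (PySem.List.slice nums (some left) (some (right + 1))).length := by omega
  have hmem : ∀ x : Int, x ∈ PySem.Set.ofList (PySem.List.slice nums (some left) (some (right + 1)))
      ↔ x ∈ PySem.List.slice nums (some left) (some (right + 1)) :=
    fun x => PySem.Set.mem_ofList _ x
  have htne : PySem.Set.ofList (PySem.List.slice nums (some left) (some (right + 1))) ≠ [] := by
    intro h
    rcases hsl : PySem.List.slice nums (some left) (some (right + 1)) with _ | ⟨x, s'⟩
    · rw [hsl] at hslen; simp at hslen
    · have hx : x ∈ PySem.Set.ofList (PySem.List.slice nums (some left) (some (right + 1))) :=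
        (hmem x).2 (by rw [hsl]; simp)
      rw [h] at hx
      simp at hx
  obtain ⟨a, ha⟩ : ∃ a, PySem.List.min? (PySem.Set.ofList (PySem.List.slice nums (some left) (some (right + 1)))) (fun x => x) = some a := by
    cases hmin : PySem.List.min? (PySem.Set.ofList (PySem.List.slice nums (some left) (some (right + 1)))) (fun x => x) with
    | none => exact absurd ((PySem.List.min?_eq_none_iff _ _).1 hmin) htne
    | some a => exact ⟨a, rfl⟩
  obtain ⟨bb, hb⟩ : ∃ b, PySem.List.max? (PySem.Set.ofList (PySem.List.slice nums (some left) (some (right + 1)))) (fun x => x) = some b := by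
    cases hmax : PySem.List.max? (PySem.Set.ofList (PySem.List.slice nums (some left) (some (right + 1)))) (fun x => x) with
    | none => exact absurd ((PySem.List.max?_eq_none_iff _ _).1 hmax) htne
    | some b => exact ⟨b, rfl⟩
  have haMem : a ∈ PySem.Set.ofList (PySem.List.slice nums (some left) (some (right + 1))) := PySem.List.min?_mem ha
  have hbMem : bb ∈ PySem.Set.ofList (PySem.List.slice nums (some left) (some (right + 1))) := PySem.List.max?_mem hb
  have haMin : ∀ y ∈ PySem.Set.ofList (PySem.List.slice nums (some left) (some (right + 1))), a ≤ y :=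
    fun y hy => PySem.List.min?_isMin ha y hy
  have hbMax : ∀ y ∈ PySem.Set.ofList (PySem.List.slice nums (some left) (some (right + 1))), y ≤ bb :=
    fun y hy => PySem.List.max?_isMax hb y hy
  have hab : a ≤ bb := hbMax a haMem
  -- the sorted distinct values
  have hvperm : (PySem.List.sorted (PySem.Set.ofList (PySem.List.slice nums (some left) (some (right + 1)))) (fun x => x) false).Perm
      (PySem.Set.ofList (PySem.List.slice nums (some left) (some (right + 1)))) :=
    PySem.List.sorted_perm _ (fun x => x) false
  have hvlt : (PySem.List.sorted (PySem.Set.ofList (PySem.List.slice nums (some left) (some (right + 1)))) (fun x => x) false).Pairwise (· < ·) :=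
    PySem.List.sorted_ofList_pairwise_lt _
  have hvmem : ∀ x : Int, x ∈ PySem.List.sorted (PySem.Set.ofList (PySem.List.slice nums (some left) (some (right + 1)))) (fun x => x) false
      ↔ x ∈ PySem.Set.ofList (PySem.List.slice nums (some left) (some (right + 1))) :=
    fun x => hvperm.mem_iff
  set values := PySem.List.sorted (PySem.Set.ofList (PySem.List.slice nums (some left) (some (right + 1)))) (fun x => x) false with hvdef
  have hvne : values ≠ [] := by
    intro h
    rw [h] at hvperm
    exact htne (List.Perm.nil_eq hvperm).symm
  have hvlen : 0 < values.length := List.length_pos_iff.2 hvne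
  -- values[0] is the minimum a, values[-1] is the maximum bb
  obtain ⟨v0, vt, hv⟩ := List.exists_cons_of_ne_nil hvne
  have hg0 : PySem.List.pyGet? values 0 = some a := by
    have h0 : v0 = a := by
      have h1 := haMin v0 ((hvmem v0).1 (by rw [hv]; simp))
      have h2 : a = v0 ∨ v0 < a := by
        have hma : a ∈ v0 :: vt := by rw [← hv]; exact (hvmem a).2 haMem
        rcases List.mem_cons.1 hma with h | h
        · left; exact h
        · right
          rw [hv] at hvlt
          exact (List.pairwise_cons.1 hvlt).1 a h
      omega
    rw [hv, h0]
    simp [PySem.List.pyGet?, PySem.List.pyIdx?]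
  have hgm1 : PySem.List.pyGet? values (-1) = some bb := by
    have hLm : values.length - 1 < values.length := by omega
    have hlastle : ∀ j, (hj : j < values.length) → values[j] ≤ values[values.length - 1]'hLm := by
      intro j hj
      have hq : values.length - 1 < (PySem.List.sorted (PySem.Set.ofList (PySem.List.slice nums (some left) (some (right + 1)))) (fun x => x) false).length := by
        rw [← hvdef]; omega
      exact PySem.List.sorted_id_getElem_mono
        (xs := PySem.Set.ofList (PySem.List.slice nums (some left) (some (right + 1))))
        (p := j) (q := values.length - 1) (by omega) hq
    obtain ⟨j, hj, hjv⟩ := List.getElem_of_mem ((hvmem bb).2 hbMem)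
    have h1 : bb ≤ values[values.length - 1]'hLm := hjv ▸ hlastle j hj
    have h2 : values[values.length - 1]'hLm ≤ bb := hbMax _ ((hvmem _).1 (List.getElem_mem _))
    have heq : values[values.length - 1]'hLm = bb := le_antisymm h2 h1
    have hidx : PySem.List.pyIdx? values.length (-1) = some (values.length - 1) := by
      simp only [PySem.List.pyIdx?]
      rw [if_neg (by omega), if_pos (by omega)]
      rfl
    simp only [PySem.List.pyGet?, hidx, Option.bind_some]
    rw [List.getElem?_eq_getElem hLm, heq]
  -- reduce both programs
  rw [show checkAP nums left right =
      (if PySem.Int.mod (bb - a) (right - left) ≠ 0 then false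
       else pyLoopA (PySem.Set.ofList (PySem.List.slice nums (some left) (some (right + 1))))
         (PySem.Int.floordiv (bb - a) (right - left)) bb ((bb - a).toNat + 1) a) by
    simp only [checkAP]; rw [ha, hb]]
  rw [show checkAP_alt nums left right =
      (if PySem.Int.mod (bb - a) (right - left) ≠ 0 then false
       else if PySem.Int.floordiv (bb - a) (right - left) = 0 then decide (values.length = 1)
       else decide (values = PySem.List.pyRange a (bb + 1) (PySem.Int.floordiv (bb - a) (right - left)))) by
    simp only [checkAP_alt]
    rw [← hvdef, hgm1, hg0]
    simp only [PySem.Int.divmod?, if_neg (show ¬ (right - left) = 0 by omega)]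
    rfl]
  by_cases hmod : PySem.Int.mod (bb - a) (right - left) ≠ 0
  · rw [if_pos hmod, if_pos hmod]
  rw [if_neg hmod, if_neg hmod]
  rw [not_ne_iff] at hmod
  have hstep : (right - left) * PySem.Int.floordiv (bb - a) (right - left) = bb - a := by
    have := PySem.Int.floordiv_mul_add_mod (bb - a) (right - left)
    rw [hmod] at this
    linarith [this, mul_comm (PySem.Int.floordiv (bb - a) (right - left)) (right - left)]
  set step := PySem.Int.floordiv (bb - a) (right - left) with hstepdef
  by_cases habe : a = bb
  · -- all distinct values are equal: both sides are true
    have hstep0 : step = 0 := by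
      rcases mul_eq_zero.1 (show (right - left) * step = 0 by omega) with h | h
      · omega
      · exact h
    rw [if_pos hstep0, hstep0]
    have hloop : pyLoopA (PySem.Set.ofList (PySem.List.slice nums (some left) (some (right + 1)))) 0 bb ((bb - a).toNat + 1) a = true := by
      have h0 : (bb - a).toNat + 1 = 1 := by omega
      rw [h0, pyLoopA, if_neg (by omega)]
    rw [hloop]
    have hlen1 : values.length = 1 := by
      rcases hv : values with _ | ⟨v0, _ | ⟨v1, vt⟩⟩
      · exact absurd hv hvne
      · rfl
      · exfalso
        have h0 : v0 = a := by
          have h1 := haMin v0 ((hvmem v0).1 (by rw [hv]; simp))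
          have h2 := hbMax v0 ((hvmem v0).1 (by rw [hv]; simp))
          omega
        have h1 : v1 = a := by
          have h1 := haMin v1 ((hvmem v1).1 (by rw [hv]; simp))
          have h2 := hbMax v1 ((hvmem v1).1 (by rw [hv]; simp))
          omega
        rw [hv] at hvlt
        have := (List.pairwise_cons.1 hvlt).1 v1 (by simp)
        omega
    simp [hlen1]
  · have habs : a < bb := lt_of_le_of_ne hab habe
    have hstepne : step ≠ 0 := by
      intro h
      rw [h, mul_zero] at hstep
      omega
    rw [if_neg hstepne]
    rcases lt_or_gt_of_ne hstepne with hneg | hpos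
    · -- negative step: A fails its first membership probe, B compares against an empty range
      have hnomem : (a + step) ∉ PySem.Set.ofList (PySem.List.slice nums (some left) (some (right + 1))) := by
        intro h
        have := haMin _ h
        omega
      have hloop : pyLoopA (PySem.Set.ofList (PySem.List.slice nums (some left) (some (right + 1)))) step bb ((bb - a).toNat + 1) a = false := by
        have h1 : (bb - a).toNat + 1 = (bb - a).toNat + 1 := rfl
        rw [show (bb - a).toNat + 1 = ((bb - a).toNat) + 1 from rfl, pyLoopA, if_pos habs]
        rw [show PySem.Set.contains (PySem.Set.ofList (PySem.List.slice nums (some left) (some (right + 1)))) (a + step) = false by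
          rw [← Bool.not_eq_true, PySem.Set.contains_iff]; exact hnomem]
        rfl
      rw [hloop]
      have hrange : PySem.List.pyRange a (bb + 1) step = [] := by
        simp only [PySem.List.pyRange, if_neg hstepne]
        rw [if_neg (by omega), if_neg (by omega)]
        simp
      rw [hrange]
      simp [hvne]
    · -- positive step: A's accepted chain is exactly the AP, which is what B's range spells out
      have hmpos : 0 < right - left := by nlinarith
      have hclle : (PySem.List.clampIdx nums.length (right + 1) : Int)
          - (PySem.List.clampIdx nums.length left : Int) ≤ right + 1 - left := by
        have h := hcl
        have h2 := hmpos
        simp only [PySem.List.clampIdx] at h ⊢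
        split_ifs at h ⊢ <;> omega
      have hslenle : ((PySem.List.slice nums (some left) (some (right + 1))).length : Int)
          ≤ right + 1 - left := by omega
      have hvlenle : (values.length : Int) ≤ right + 1 - left := by
        have h1 := hvperm.length_eq
        have h2 := PySem.Set.length_ofList_le (PySem.List.slice nums (some left) (some (right + 1)))
        omega
      have hcount : PySem.List.pyRange a (bb + 1) step = apList a step ((right - left).toNat + 1) := by
        simp only [PySem.List.pyRange, if_neg hstepne, if_pos hpos, if_pos (show a < bb + 1 by omega)]
        have he1 : bb + 1 - a + step - 1 = (right - left + 1) * step := by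
          rw [add_mul, hstep]; ring
        rw [he1, Int.mul_ediv_cancel _ (ne_of_gt hpos)]
        rw [show (right - left + 1).toNat = (right - left).toNat + 1 by omega]
        rw [apList_eq_map]
      rw [hcount]
      have hdvdsb : step ∣ bb - a := ⟨right - left, by rw [← hstep]; ring⟩
      have hloopiff := pyLoopA_true_iff
        (PySem.Set.ofList (PySem.List.slice nums (some left) (some (right + 1)))) step bb hpos
        ((bb - a).toNat + 1) a hab hdvdsb (by omega)
      have hiff : pyLoopA (PySem.Set.ofList (PySem.List.slice nums (some left) (some (right + 1)))) step bb ((bb - a).toNat + 1) a = true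
          ↔ values = apList a step ((right - left).toNat + 1) := by
        rw [hloopiff]
        constructor
        · intro hchain
          have hapsub : apList a step ((right - left).toNat + 1)
              ⊆ PySem.Set.ofList (PySem.List.slice nums (some left) (some (right + 1))) := by
            intro x hx
            obtain ⟨j, hj, rfl⟩ := (mem_apList _ _ _ _).1 hx
            match j with
            | 0 => simpa using haMem
            | j + 1 =>
              refine hchain (j + 1) (by omega) ?_
              have hj' : ((j + 1 : Nat) : Int) ≤ right - left := by omega
              nlinarith
          have hnodupAp : (apList a step ((right - left).toNat + 1)).Nodup :=
            (pairwise_apList a step hpos _).imp (fun h => ne_of_lt h)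
          have hperm : (apList a step ((right - left).toNat + 1)).Perm
              (PySem.Set.ofList (PySem.List.slice nums (some left) (some (right + 1)))) := by
            refine (List.subperm_of_subset hnodupAp hapsub).perm_of_length_le ?_
            rw [length_apList]
            have h1 := hvperm.length_eq
            omega
          rw [hvdef]
          exact (PySem.List.sorted_eq_of_perm_of_pairwise_lt _ _ _ hperm
            (pairwise_apList a step hpos _)).symm ▸ rfl
        · intro hveq j hj hjb
          have hjle : (j : Int) ≤ right - left := by
            have h1 : (j : Int) * step ≤ (right - left) * step := by linarith [hstep, hjb]
            exact le_of_mul_le_mul_right h1 hpos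
          have hx : (a + (j : Int) * step) ∈ values := by
            rw [hveq]
            exact (mem_apList _ _ _ _).2 ⟨j, by omega, rfl⟩
          exact (hvmem _).1 hx
      by_cases hv : values = apList a step ((right - left).toNat + 1)
      · rw [hiff.2 hv]
        simp [hv]
      · have : pyLoopA (PySem.Set.ofList (PySem.List.slice nums (some left) (some (right + 1)))) step bb ((bb - a).toNat + 1) a = false := by
          rw [← Bool.not_eq_true]
          intro h
          exact hv (hiff.1 h)
        rw [this]
        simp [hv]

-- ===== VERDICT (by name: the statement is the Claim_ definition above) =====
theorem checkAP_spec : Claim_equal_checkAP := by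
  intro nums left right _ hpre
  exact checkAP_core_eq nums left right hpre.1 hpre.2
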